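-- pv_equiv track=rewrite | github.com/jier/docsible | docsible/analyzers/complexity_analyzer.py | _detect_container_platform
-- ===== SOURCE A (Python) =====
-- from typing import Dict, Any, List, Optional
--
-- def _detect_container_platform(modules: List[str]) -> str:
--     """Detect specific container platform from modules."""
--     if any("kubernetes" in m or "k8s" in m for m in modules):
--         return "Kubernetes"
--     elif any("docker" in m for m in modules):
--         return "Docker"
--     elif any("podman" in m for m in modules):
--         return "Podman"
--     else:
--         return "Container Platform"
-- ===== SOURCE B (Python) =====
-- from typing import List
--
-- def _detect_container_platform(modules: List[str]) -> str:
--     """Detect specific container platform from modules (single pass over flags)."""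
--     has_k8s = has_docker = has_podman = False
--     for m in modules:
--         has_k8s = has_k8s or "kubernetes" in m or "k8s" in m
--         has_docker = has_docker or "docker" in m
--         has_podman = has_podman or "podman" in m
--     if has_k8s:
--         return "Kubernetes"
--     if has_docker:
--         return "Docker"
--     if has_podman:
--         return "Podman"
--     return "Container Platform"
-- ===== Notes on version B (the rewrite author's own statement) =====
-- stated objective: alternative
-- what changed: Replaces three short-circuiting any() scans over the list by a single pass that accumulates three boolean flags, then resolves the fixed priority after the loop.
import Mathlib
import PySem

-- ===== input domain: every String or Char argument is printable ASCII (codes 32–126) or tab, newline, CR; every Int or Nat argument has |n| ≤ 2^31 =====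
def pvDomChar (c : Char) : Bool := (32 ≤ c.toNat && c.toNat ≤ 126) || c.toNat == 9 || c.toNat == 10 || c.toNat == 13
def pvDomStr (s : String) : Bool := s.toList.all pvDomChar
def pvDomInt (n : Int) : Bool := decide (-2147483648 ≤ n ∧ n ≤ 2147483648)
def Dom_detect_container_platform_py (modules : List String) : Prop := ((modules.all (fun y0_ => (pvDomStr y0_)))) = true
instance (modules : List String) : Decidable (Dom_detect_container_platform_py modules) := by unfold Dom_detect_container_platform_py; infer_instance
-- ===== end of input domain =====

-- ===== PORT A =====
-- literal port of A: three short-circuiting any() scans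
def detect_container_platform_py (modules : List String) : String :=
  if modules.any (fun m => PySem.Str.isIn "kubernetes" m || PySem.Str.isIn "k8s" m) then
    "Kubernetes"
  else if modules.any (fun m => PySem.Str.isIn "docker" m) then
    "Docker"
  else if modules.any (fun m => PySem.Str.isIn "podman" m) then
    "Podman"
  else
    "Container Platform"

-- ===== PORT B =====
-- port of B: one pass accumulating three boolean flags, then fixed-priority resolution
def detect_container_platform_py_alt (modules : List String) : String :=
  let flags := modules.foldl
    (fun (st : Bool × Bool × Bool) m =>
      (st.1 || PySem.Str.isIn "kubernetes" m || PySem.Str.isIn "k8s" m,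
       st.2.1 || PySem.Str.isIn "docker" m,
       st.2.2 || PySem.Str.isIn "podman" m))
    (false, false, false)
  if flags.1 then "Kubernetes"
  else if flags.2.1 then "Docker"
  else if flags.2.2 then "Podman"
  else "Container Platform"

-- ===== PRECONDITION & SPEC =====
def Spec_detect_container_platform_py (modules : List String) (out : String) : Prop := out = detect_container_platform_py_alt modules
instance (modules : List String) (out : String) : Decidable (Spec_detect_container_platform_py modules out) := by unfold Spec_detect_container_platform_py; infer_instance

-- ===== CLAIM (what is proved, stated in full; the proofs are below) =====
def Claim_equal_detect_container_platform_py : Prop := ∀ (modules : List String), Dom_detect_container_platform_py modules → Spec_detect_container_platform_py modules (detect_container_platform_py modules)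

-- ===== LEMMAS AND PROOFS =====

lemma pv_flags_foldl (modules : List String) (a b c : Bool) :
    modules.foldl
      (fun (st : Bool × Bool × Bool) m =>
        (st.1 || PySem.Str.isIn "kubernetes" m || PySem.Str.isIn "k8s" m,
         st.2.1 || PySem.Str.isIn "docker" m,
         st.2.2 || PySem.Str.isIn "podman" m))
      (a, b, c)
    = (a || modules.any (fun m => PySem.Str.isIn "kubernetes" m || PySem.Str.isIn "k8s" m),
       b || modules.any (fun m => PySem.Str.isIn "docker" m),
       c || modules.any (fun m => PySem.Str.isIn "podman" m)) := by
  induction modules generalizing a b c with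
  | nil => simp
  | cons x xs ih =>
      simp only [List.foldl_cons, List.any_cons]
      rw [ih]
      simp [Bool.or_assoc]

-- ===== VERDICT (by name: the statement is the Claim_ definition above) =====
theorem detect_container_platform_py_spec : Claim_equal_detect_container_platform_py := by
  intro modules _
  unfold Spec_detect_container_platform_py detect_container_platform_py detect_container_platform_py_alt
  simp only [pv_flags_foldl, Bool.false_or]
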